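-- pv_equiv track=rewrite | github.com/yonasman/Python_Practice | uda.py | custom
-- ===== SOURCE A (Python) =====
-- def custom(par):
--     new = []
--     for e in par:
--         sum = 0
--         for i in range(par.index(e) + 1):
--             sum += par[i]
--         new.append(sum)
--     return new
-- ===== SOURCE B (Python) =====
-- def custom(par):
--     prefix = []
--     s = 0
--     for x in par:
--         s += x
--         prefix.append(s)
--     first = {}
--     for i, x in enumerate(par):
--         if x not in first:
--             first[x] = i
--     return [prefix[first[e]] for e in par]
-- ===== Notes on version B (the rewrite author's own statement) =====
-- stated objective: faster
-- what changed: Replaces the per-element list.index scan plus inner summation loop (quadratic, even cubic-ish) by one prefix-sum pass and one first-occurrence dict pass, then a single O(1) lookup per element.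
import Mathlib
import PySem

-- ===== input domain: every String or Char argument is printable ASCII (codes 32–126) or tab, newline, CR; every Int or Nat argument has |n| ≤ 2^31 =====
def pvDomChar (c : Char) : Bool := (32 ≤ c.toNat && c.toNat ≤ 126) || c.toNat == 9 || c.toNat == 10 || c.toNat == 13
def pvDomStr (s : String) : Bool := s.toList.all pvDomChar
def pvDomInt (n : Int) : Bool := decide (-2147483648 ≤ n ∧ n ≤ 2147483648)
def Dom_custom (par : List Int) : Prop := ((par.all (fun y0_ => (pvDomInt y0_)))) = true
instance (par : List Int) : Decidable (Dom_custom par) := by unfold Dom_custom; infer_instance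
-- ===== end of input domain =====

-- B replaces A's per-element list.index scan + inner summation loop by one prefix-sum pass
-- and a first-occurrence dict, one O(1) lookup per element (objective: faster).

-- ===== PORT A =====
-- par.index(e) is called with e ∈ par, so it never raises; getD 0 is unreachable.
def custom (par : List Int) : List Int :=
  par.foldl (fun new e =>
    let sum : Int :=
      (PySem.List.pyRange 0 (((PySem.List.index? par e).getD 0 : Nat) + 1) 1).foldl
        (fun s i => s + PySem.List.pyGetD par i 0) 0
    new ++ [sum]) []

-- ===== PORT B =====
def custom_alt (par : List Int) : List Int :=
  let pr := (par.foldl (fun (acc : List Int × Int) x => (acc.1 ++ [acc.2 + x], acc.2 + x))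
              (([] : List Int), (0 : Int))).1
  let first := (PySem.List.enumerate par 0).foldl
      (fun (d : PySem.Dict Int Int) ix =>
        if !(d.contains ix.2) then d.insert ix.2 ix.1 else d) PySem.Dict.empty
  par.map (fun e => PySem.List.pyGetD pr (first.getD e 0) 0)

-- ===== PRECONDITION & SPEC =====
def Spec_custom (par : List Int) (out : List Int) : Prop := out = custom_alt par
instance (par : List Int) (out : List Int) : Decidable (Spec_custom par out) := by unfold Spec_custom; infer_instance

-- ===== CLAIM (what is proved, stated in full; the proofs are below) =====
def Claim_equal_custom : Prop := ∀ (par : List Int), Dom_custom par → Spec_custom par (custom par)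

-- ===== LEMMAS AND PROOFS =====

theorem foldl_append_singleton (l : List Int) (f : Int → Int) (acc : List Int) :
    l.foldl (fun new e => new ++ [f e]) acc = acc ++ l.map f := by
  induction l generalizing acc with
  | nil => simp
  | cons x xs ih => simp [List.foldl, ih]

theorem sumA_eq_take (par : List Int) (k : Nat) (hk : k ≤ par.length) (init : Int) :
    (PySem.List.pyRange 0 (k : Int) 1).foldl (fun s i => s + PySem.List.pyGetD par i 0) init
      = init + (par.take k).sum := by
  induction k generalizing init with
  | zero => simp [PySem.List.pyRange_one_eq_nil]
  | succ n ih =>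
    have hn : n < par.length := by omega
    have hcast : ((n + 1 : Nat) : Int) = (n : Int) + 1 := by push_cast; ring
    have hrange : PySem.List.pyRange 0 ((n : Int) + 1) 1
        = PySem.List.pyRange 0 (n : Int) 1 ++ [(n : Int)] :=
      PySem.List.pyRange_one_succ_right (by positivity)
    rw [hcast, hrange, List.foldl_append, ih (le_of_lt hn) init]
    simp only [List.foldl_cons, List.foldl_nil, PySem.List.pyGetD_natCast]
    rw [List.getD_eq_getElem?_getD, List.getElem?_eq_getElem hn, List.sum_take_succ par n hn]
    simp only [Option.getD_some]
    ring

def prefAux (s : Int) : List Int → List Int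
  | [] => []
  | x :: xs => (s + x) :: prefAux (s + x) xs

theorem foldl_pref (l : List Int) (acc : List Int) (s : Int) :
    (l.foldl (fun (a : List Int × Int) x => (a.1 ++ [a.2 + x], a.2 + x)) (acc, s)).1
      = acc ++ prefAux s l := by
  induction l generalizing acc s with
  | nil => simp [prefAux]
  | cons x xs ih => simp [List.foldl, ih, prefAux]

theorem prefAux_getD (l : List Int) (s : Int) (k : Nat) (hk : k < l.length) :
    (prefAux s l).getD k 0 = s + (l.take (k + 1)).sum := by
  induction l generalizing s k with
  | nil => simp at hk
  | cons x xs ih =>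
    cases k with
    | zero => simp [prefAux]
    | succ n =>
      have hn : n < xs.length := by simpa using hk
      rw [show prefAux s (x :: xs) = (s + x) :: prefAux (s + x) xs from rfl,
        List.getD_cons_succ, ih (s + x) n hn, List.take_succ_cons, List.sum_cons]
      ring

theorem dict_first (l : List Int) (s : Int) (d : PySem.Dict Int Int) (e : Int) :
    ((PySem.List.enumerate l s).foldl
        (fun (d : PySem.Dict Int Int) ix =>
          if !(d.contains ix.2) then d.insert ix.2 ix.1 else d) d).get? e
      = (d.get? e).or (Option.map (fun k : Nat => s + (k : Int)) (PySem.List.index? l e)) := by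
  induction l generalizing s d with
  | nil => simp [PySem.List.enumerate_nil]
  | cons x xs ih =>
    rw [PySem.List.enumerate_cons]
    simp only [List.foldl_cons]
    rw [ih]
    by_cases hex : e = x
    · subst hex
      rw [PySem.List.index?_cons_self]
      by_cases hc : d.contains e
      · have hs : (d.get? e).isSome := by
          rw [← PySem.Dict.contains_eq_isSome_get?]; exact hc
        rcases Option.isSome_iff_exists.mp hs with ⟨v, hv⟩
        simp [hc, hv]
      · have hnone : d.get? e = none := by
          rw [Option.eq_none_iff_forall_ne_some]
          intro v hv
          exact hc (by rw [PySem.Dict.contains_eq_isSome_get?, hv]; rfl)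
        simp [hc, hnone, PySem.Dict.get?_insert_self]
    · rw [PySem.List.index?_cons_of_ne xs (fun h => hex h.symm)]
      have hget : (if !(d.contains x) then d.insert x s else d).get? e = d.get? e := by
        split
        · exact PySem.Dict.get?_insert_of_ne d s hex
        · rfl
      rw [hget]
      congr 1
      cases PySem.List.index? xs e with
      | none => rfl
      | some m => simp only [Option.map_some]; congr 1; push_cast; ring

theorem custom_eq_map (par : List Int) :
    custom par = par.map (fun e =>
      (PySem.List.pyRange 0 (((PySem.List.index? par e).getD 0 : Nat) + 1) 1).foldl
        (fun s i => s + PySem.List.pyGetD par i 0) 0) := by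
  unfold custom
  exact foldl_append_singleton par _ []

theorem pointwise (par : List Int) (e : Int) (he : e ∈ par) :
    (PySem.List.pyRange 0 (((PySem.List.index? par e).getD 0 : Nat) + 1) 1).foldl
        (fun s i => s + PySem.List.pyGetD par i 0) 0
      = PySem.List.pyGetD (prefAux 0 par)
          ((((PySem.List.enumerate par 0).foldl
              (fun (d : PySem.Dict Int Int) ix =>
                if !(d.contains ix.2) then d.insert ix.2 ix.1 else d)
              PySem.Dict.empty).getD e 0)) 0 := by
  rcases Option.isSome_iff_exists.mp ((PySem.List.index?_isSome_iff par e).mpr he) with ⟨k, hk⟩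
  rcases PySem.List.getElem_of_index?_eq_some hk with ⟨hklt, -, -⟩
  have hdict := dict_first par 0 PySem.Dict.empty e
  rw [hk] at hdict
  simp only [PySem.Dict.get?_empty, Option.or, Option.map_some, zero_add] at hdict
  rw [PySem.Dict.getD_eq_get?_getD, hdict, hk]
  simp only [Option.getD_some]
  have hcast : (((k : Nat) : Int) + 1) = ((k + 1 : Nat) : Int) := by push_cast; ring
  rw [hcast, sumA_eq_take par (k + 1) (by omega) 0, PySem.List.pyGetD_natCast,
    prefAux_getD par 0 k hklt]

-- ===== VERDICT (by name: the statement is the Claim_ definition above) =====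
theorem custom_spec : Claim_equal_custom := by
  intro par _
  unfold Spec_custom custom_alt
  rw [custom_eq_map, foldl_pref par [] 0]
  simp only [List.nil_append]
  exact List.map_congr_left (fun e he => pointwise par e he)
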